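-- pv_equiv track=rewrite | github.com/CorradoColaleo/CyberChallengeIT | TestDiAmmissione/Attachments/indexes.py | check_subarray_valid
-- ===== SOURCE A (Python) =====
-- def check_subarray_valid(freq, triples):
--     for (x, y, z) in triples:
--         if x == y == z:
--             if freq[x] >= 3:
--                 return True
--         elif x == y != z:
--             if freq[x] >= 2 and freq[z] >= 1:
--                 return True
--         elif x != y == z:
--             if freq[y] >= 2 and freq[x] >= 1:
--                 return True
--         elif x != y and y != z and z != x:
--             if freq[x] >= 1 and freq[y] >= 1 and freq[z] >= 1:
--                 return True
--     return False
-- ===== SOURCE B (Python) =====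
-- def check_subarray_valid(freq, triples):
--     def sat(t):
--         return all(freq[v] >= t.count(v) for v in t)
--     for t in triples:
--         if sat(t):
--             return True
--     return False
-- ===== Notes on version B (the rewrite author's own statement) =====
-- stated objective: simpler
-- what changed: B replaces A's four equality-pattern branches by one uniform multiset check per triple (require freq[v] >= the triple's multiplicity of v for every coordinate), which also handles the x==z!=y pattern A's branch chain silently skips.
-- intended difference: When every triple satisfying the multiset condition freq[v] >= multiplicity has the pattern x == z != y and at least one such triple exists, A returns False (its branch chain has no case for that pattern) while B returns True, which is the intended answer for a satisfiability check over triple multiplicities. — e.g. on check_subarray_valid([(1, 2), (2, 1)], [(1, 2, 1)]): A returns false, B returns true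
-- outside the precondition, e.g. on check_subarray_valid({}, [(1, 2, 1)]): A returns False, B raises KeyError; on check_subarray_valid({1: 1}, [(1, 1, 2), (1, 1, 1)]): A returns False, B returns False
import Mathlib
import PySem

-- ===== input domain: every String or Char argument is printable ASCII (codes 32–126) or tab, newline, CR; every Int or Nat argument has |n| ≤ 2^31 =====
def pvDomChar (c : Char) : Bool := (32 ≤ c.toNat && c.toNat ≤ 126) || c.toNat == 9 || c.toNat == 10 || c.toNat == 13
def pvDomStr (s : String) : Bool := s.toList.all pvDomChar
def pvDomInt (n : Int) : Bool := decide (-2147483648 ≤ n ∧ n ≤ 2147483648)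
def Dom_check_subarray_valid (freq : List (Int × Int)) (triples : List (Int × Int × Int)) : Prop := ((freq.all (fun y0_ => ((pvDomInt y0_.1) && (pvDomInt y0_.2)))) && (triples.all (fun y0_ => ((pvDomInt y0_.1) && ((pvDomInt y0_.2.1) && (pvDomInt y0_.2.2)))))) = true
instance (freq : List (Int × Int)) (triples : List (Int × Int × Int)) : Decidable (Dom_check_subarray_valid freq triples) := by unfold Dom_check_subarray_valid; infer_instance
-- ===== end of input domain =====

-- B folds A's four equality-pattern branches into one uniform multiset check per triple (simpler);
-- on triples with x == z != y (which A's branch chain silently skips) B returns the intended answer — see D_ below.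


-- freq[v]: under Pre_ every looked-up key is present, so the default 0 is never consulted
-- (a missing key is a Python KeyError, excluded by Pre_check_subarray_valid).
def pvLook (freq : List (Int × Int)) (v : Int) : Int := (PySem.Dict.mk freq).getD v 0

-- ===== PORT A =====
def check_subarray_valid (freq : List (Int × Int)) (triples : List (Int × Int × Int)) : Bool :=
  match triples with
  | [] => false
  | (x, y, z) :: rest =>
    if x = y ∧ y = z then
      if pvLook freq x ≥ 3 then true else check_subarray_valid freq rest
    else if x = y ∧ y ≠ z then
      if pvLook freq x ≥ 2 ∧ pvLook freq z ≥ 1 then true else check_subarray_valid freq rest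
    else if x ≠ y ∧ y = z then
      if pvLook freq y ≥ 2 ∧ pvLook freq x ≥ 1 then true else check_subarray_valid freq rest
    else if x ≠ y ∧ y ≠ z ∧ z ≠ x then
      if pvLook freq x ≥ 1 ∧ pvLook freq y ≥ 1 ∧ pvLook freq z ≥ 1 then true
      else check_subarray_valid freq rest
    else check_subarray_valid freq rest

-- ===== PORT B =====
-- Source B's helper sat(t): all(freq[v] >= t.count(v) for v in t)
def pvSat (freq : List (Int × Int)) (t : Int × Int × Int) : Bool :=
  [t.1, t.2.1, t.2.2].all (fun v => pvLook freq v ≥ (PySem.List.count [t.1, t.2.1, t.2.2] v : Int))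

def check_subarray_valid_alt (freq : List (Int × Int)) (triples : List (Int × Int × Int)) : Bool :=
  match triples with
  | [] => false
  | t :: rest => if pvSat freq t then true else check_subarray_valid_alt freq rest

-- ===== PRECONDITION & SPEC =====
-- the palindromic pattern x == z != y
def pvPal (t : Int × Int × Int) : Bool := t.1 = t.2.2 ∧ t.1 ≠ t.2.1

-- the triple is satisfiable from freq: each coordinate's multiplicity in the triple is at most its frequency
def pvSatD (freq : List (Int × Int)) (t : Int × Int × Int) : Bool :=
  decide (∀ v ∈ [t.1, t.2.1, t.2.2],
    (if v = t.1 then 1 else 0) + (if v = t.2.1 then 1 else 0) + (if v = t.2.2 then (1 : Int) else 0)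
      ≤ pvLook freq v)

-- every coordinate of the triple is a key of freq
def pvKeyed (freq : List (Int × Int)) (t : Int × Int × Int) : Bool :=
  ((PySem.Dict.mk freq).get? t.1).isSome && ((PySem.Dict.mk freq).get? t.2.1).isSome &&
    ((PySem.Dict.mk freq).get? t.2.2).isSome

-- Pre_ excludes inputs on which a triple coordinate missing from freq is (or may be) looked up:
-- there a lookup raises KeyError, and whether A (or B) actually raises or still returns is an
-- accident of branch and short-circuit order. Admitted: every coordinate is a key, or some fully
-- keyed prefix ends in a satisfiable non-palindromic triple (both programs then return before any
-- missing key is reached).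
def Pre_check_subarray_valid (freq : List (Int × Int)) (triples : List (Int × Int × Int)) : Prop :=
  (∀ t ∈ triples, pvKeyed freq t = true) ∨
    ∃ n < triples.length, (∀ t ∈ triples.take (n + 1), pvKeyed freq t = true) ∧
      (pvSatD freq (triples.getD n (0, 0, 0)) && !pvPal (triples.getD n (0, 0, 0))) = true
instance (freq : List (Int × Int)) (triples : List (Int × Int × Int)) : Decidable (Pre_check_subarray_valid freq triples) := by unfold Pre_check_subarray_valid; infer_instance
def pvWitness_check_subarray_valid : (List (Int × Int)) × (List (Int × Int × Int)) := ([(1, 2), (2, 1)], [(1, 2, 2)])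

-- On inputs where some triple is satisfiable but every satisfiable triple has the pattern
-- x == z != y, A returns False (its branch chain has no case for that pattern) while B returns
-- True, the intended answer for a multiset-satisfiability check.
def D_check_subarray_valid (freq : List (Int × Int)) (triples : List (Int × Int × Int)) : Prop :=
  (triples.any (pvSatD freq) && triples.all (fun t => pvPal t || !pvSatD freq t)) = true
instance (freq : List (Int × Int)) (triples : List (Int × Int × Int)) : Decidable (D_check_subarray_valid freq triples) := by unfold D_check_subarray_valid; infer_instance

def Spec_check_subarray_valid (freq : List (Int × Int)) (triples : List (Int × Int × Int)) (out : Bool) : Prop := ¬ D_check_subarray_valid freq triples → out = check_subarray_valid_alt freq triples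
instance (freq : List (Int × Int)) (triples : List (Int × Int × Int)) (out : Bool) : Decidable (Spec_check_subarray_valid freq triples out) := by unfold Spec_check_subarray_valid; infer_instance

def pvDiffWitness_check_subarray_valid : (List (Int × Int)) × (List (Int × Int × Int)) := ([(1, 2), (2, 1)], [(1, 2, 1)])
def pvDiffWitnessOut_check_subarray_valid : Bool × Bool := (false, true)

-- ===== CLAIM (what is proved, stated in full; the proofs are below) =====
def Claim_unchanged_check_subarray_valid : Prop := ∀ (freq : List (Int × Int)) (triples : List (Int × Int × Int)), Dom_check_subarray_valid freq triples → Pre_check_subarray_valid freq triples → Spec_check_subarray_valid freq triples (check_subarray_valid freq triples)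
def Claim_changed_check_subarray_valid : Prop := Dom_check_subarray_valid (pvDiffWitness_check_subarray_valid.1) (pvDiffWitness_check_subarray_valid.2) ∧ Pre_check_subarray_valid (pvDiffWitness_check_subarray_valid.1) (pvDiffWitness_check_subarray_valid.2) ∧ D_check_subarray_valid (pvDiffWitness_check_subarray_valid.1) (pvDiffWitness_check_subarray_valid.2) ∧ check_subarray_valid (pvDiffWitness_check_subarray_valid.1) (pvDiffWitness_check_subarray_valid.2) = pvDiffWitnessOut_check_subarray_valid.1 ∧ check_subarray_valid_alt (pvDiffWitness_check_subarray_valid.1) (pvDiffWitness_check_subarray_valid.2) = pvDiffWitnessOut_check_subarray_valid.2 ∧ pvDiffWitnessOut_check_subarray_valid.1 ≠ pvDiffWitnessOut_check_subarray_valid.2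
def Claim_exact_check_subarray_valid : Prop := ∀ (freq : List (Int × Int)) (triples : List (Int × Int × Int)), Dom_check_subarray_valid freq triples → Pre_check_subarray_valid freq triples → D_check_subarray_valid freq triples → check_subarray_valid freq triples ≠ check_subarray_valid_alt freq triples

-- ===== LEMMAS AND PROOFS =====

-- D_'s satisfiability condition coincides with Source B's sat helper
lemma satD_eq (freq : List (Int × Int)) (t : Int × Int × Int) :
    pvSatD freq t = pvSat freq t := by
  obtain ⟨x, y, z⟩ := t
  by_cases hxy : x = y <;> by_cases hyz : y = z <;> by_cases hzx : z = x <;>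
    apply Bool.eq_iff_iff.mpr <;>
    simp_all [pvSatD, pvSat, PySem.List.count_eq, List.count_cons] <;>
    omega

-- A's four branches fire exactly on satisfiable non-palindromic triples
lemma satPal (freq : List (Int × Int)) (x y z : Int) :
    (pvSat freq (x, y, z) && !pvPal (x, y, z)) =
      (if x = y ∧ y = z then decide (pvLook freq x ≥ 3)
       else if x = y ∧ y ≠ z then decide (pvLook freq x ≥ 2 ∧ pvLook freq z ≥ 1)
       else if x ≠ y ∧ y = z then decide (pvLook freq y ≥ 2 ∧ pvLook freq x ≥ 1)
       else if x ≠ y ∧ y ≠ z ∧ z ≠ x then decide (pvLook freq x ≥ 1 ∧ pvLook freq y ≥ 1 ∧ pvLook freq z ≥ 1)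
       else false) := by
  by_cases hxy : x = y <;> by_cases hyz : y = z <;> by_cases hzx : z = x <;>
    apply Bool.eq_iff_iff.mpr <;>
    simp_all [pvSat, pvPal, PySem.List.count_eq, List.count_cons] <;>
    constructor <;> intro hh <;> (try simp_all) <;> omega

lemma A_cons (freq : List (Int × Int)) (x y z : Int) (rest : List (Int × Int × Int)) :
    check_subarray_valid freq ((x, y, z) :: rest) =
      ((pvSat freq (x, y, z) && !pvPal (x, y, z)) || check_subarray_valid freq rest) := by
  rw [satPal]
  simp only [check_subarray_valid]
  split_ifs <;> simp_all

lemma B_cons (freq : List (Int × Int)) (t : Int × Int × Int) (rest : List (Int × Int × Int)) :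
    check_subarray_valid_alt freq (t :: rest) =
      (pvSat freq t || check_subarray_valid_alt freq rest) := by
  simp only [check_subarray_valid_alt]
  split <;> simp_all

lemma A_true_iff (freq : List (Int × Int)) (ts : List (Int × Int × Int)) :
    check_subarray_valid freq ts = true ↔
      ∃ t ∈ ts, pvSat freq t = true ∧ pvPal t = false := by
  induction ts with
  | nil => simp [check_subarray_valid]
  | cons t rest ih =>
    obtain ⟨x, y, z⟩ := t
    rw [A_cons]
    simp only [Bool.or_eq_true, Bool.and_eq_true, Bool.not_eq_true', ih, List.mem_cons]
    constructor
    · rintro (⟨h1, h2⟩ | ⟨u, hu, h⟩)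
      · exact ⟨(x, y, z), Or.inl rfl, h1, h2⟩
      · exact ⟨u, Or.inr hu, h⟩
    · rintro ⟨u, hu | hu, h⟩
      · subst hu; exact Or.inl h
      · exact Or.inr ⟨u, hu, h⟩

lemma B_true_iff (freq : List (Int × Int)) (ts : List (Int × Int × Int)) :
    check_subarray_valid_alt freq ts = true ↔ ∃ t ∈ ts, pvSat freq t = true := by
  induction ts with
  | nil => simp [check_subarray_valid_alt]
  | cons t rest ih =>
    obtain ⟨x, y, z⟩ := t
    rw [B_cons]
    simp only [Bool.or_eq_true, ih, List.mem_cons]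
    constructor
    · rintro (h | ⟨u, hu, h⟩)
      · exact ⟨(x, y, z), Or.inl rfl, h⟩
      · exact ⟨u, Or.inr hu, h⟩
    · rintro ⟨u, hu | hu, h⟩
      · subst hu; exact Or.inl h
      · exact Or.inr ⟨u, hu, h⟩

-- ===== VERDICT (by name: the statement is the Claim_ definition above) =====
theorem check_subarray_valid_spec : Claim_unchanged_check_subarray_valid := by
  intro freq ts _ _ hnd
  by_cases h1 : ∃ t ∈ ts, pvSat freq t = true ∧ pvPal t = false
  · rcases h1 with ⟨t, ht, hs, hp⟩
    rw [(A_true_iff _ _).mpr ⟨t, ht, hs, hp⟩, (B_true_iff _ _).mpr ⟨t, ht, hs⟩]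
  · by_cases h2 : ∃ t ∈ ts, pvSat freq t = true
    · exfalso
      apply hnd
      unfold D_check_subarray_valid
      rcases h2 with ⟨t, ht, hs⟩
      simp only [satD_eq, Bool.and_eq_true, List.any_eq_true, List.all_eq_true, Bool.or_eq_true,
        Bool.not_eq_true']
      refine ⟨⟨t, ht, hs⟩, fun u hu => ?_⟩
      by_cases hp : pvPal u = true
      · exact Or.inl hp
      · by_cases hsu : pvSat freq u = true
        · exact absurd ⟨u, hu, hsu, by simpa using hp⟩ h1
        · exact Or.inr (by simpa using hsu)
    · have hA : check_subarray_valid freq ts = false := by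
        rw [← Bool.not_eq_true, A_true_iff]
        rintro ⟨t, ht, hs, _⟩
        exact h2 ⟨t, ht, hs⟩
      have hB : check_subarray_valid_alt freq ts = false := by
        rw [← Bool.not_eq_true, B_true_iff]
        exact h2
      rw [hA, hB]

theorem check_subarray_valid_changed : Claim_changed_check_subarray_valid := by
  unfold Claim_changed_check_subarray_valid; decide

theorem check_subarray_valid_tight : Claim_exact_check_subarray_valid := by
  intro freq ts _ _ hd
  unfold D_check_subarray_valid at hd
  simp only [satD_eq, Bool.and_eq_true, List.any_eq_true, List.all_eq_true, Bool.or_eq_true,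
    Bool.not_eq_true'] at hd
  rcases hd with ⟨⟨t, ht, hs⟩, hall⟩
  have hA : check_subarray_valid freq ts = false := by
    rw [← Bool.not_eq_true, A_true_iff]
    rintro ⟨u, hu, hus, hup⟩
    rcases hall u hu with h | h <;> simp_all
  rw [hA, (B_true_iff freq ts).mpr ⟨t, ht, hs⟩]
  simp
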